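-- pv_equiv track=rewrite | github.com/oikeuchi/jomfft | misc/script/primefactor.py | input_indices
-- ===== SOURCE A (Python) =====
-- def product(factors):
--     out = 1
--     for f in factors:
--         out *= f
--     return out
--
-- def idempotent(n, p):
--     assert(n > 0 and p > 0)
--     q = n // p
--     assert(q % p != 0)
--     i = 1
--     while (q * i) % p != 1:
--         i += 1
--     assert(i < p)
--     return q * i
--
-- def recursively_append_indices(n, sizes, scales, i, v, out):
--     if i < 0:
--         out.append(v % n)
--     else:
--         for j in range(sizes[i]):
--             recursively_append_indices(n, sizes, scales, i - 1,
--                                   v + scales[i] * j, out)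
--
-- def input_indices(factors):
--     n = product(factors)
--     e = []
--     for f in factors:
--         e.append(idempotent(n, f))
--     out = []
--     for j in range(factors[-1]):
--         recursively_append_indices(n, factors, e, len(factors) - 2,
--                                 e[-1] * j, out)
--     return out
-- ===== SOURCE B (Python) =====
-- def product(factors):
--     out = 1
--     for f in factors:
--         out *= f
--     return out
--
-- def idempotent(n, p):
--     assert(n > 0 and p > 0)
--     q = n // p
--     assert(q % p != 0)
--     i = 1
--     while (q * i) % p != 1:
--         i += 1
--     assert(i < p)
--     return q * i
--
-- def input_indices(factors):
--     n = product(factors)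
--     e = [idempotent(n, f) for f in factors]
--     out = []
--     for t in range(n):
--         v = 0
--         rem = t
--         for f, ef in zip(factors, e):
--             rem, d = divmod(rem, f)
--             v += ef * d
--         out.append(v % n)
--     return out
-- ===== Notes on version B (the rewrite author's own statement) =====
-- stated objective: alternative
-- what changed: Replaces the recursive nested-loop digit enumeration with a single flat loop over range(n) that decodes each counter value into mixed-radix digits by successive divmod.
import Mathlib
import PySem

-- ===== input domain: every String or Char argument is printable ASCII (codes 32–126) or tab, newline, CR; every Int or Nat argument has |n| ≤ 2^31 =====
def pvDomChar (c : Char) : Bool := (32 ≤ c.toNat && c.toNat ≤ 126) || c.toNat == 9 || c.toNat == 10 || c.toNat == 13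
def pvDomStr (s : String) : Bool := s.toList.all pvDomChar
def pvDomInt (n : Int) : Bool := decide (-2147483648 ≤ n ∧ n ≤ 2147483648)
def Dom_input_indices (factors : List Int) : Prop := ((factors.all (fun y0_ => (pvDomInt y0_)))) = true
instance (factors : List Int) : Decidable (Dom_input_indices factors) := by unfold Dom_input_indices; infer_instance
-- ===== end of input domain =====

-- B replaces A's recursive nested-loop enumeration by one flat counter loop with divmod digit decoding (alternative decomposition, same cost).
-- A mutates only its own local list 'out'; no caller-visible side effects.

-- ===== PORT A =====
def pvProduct (factors : List Int) : Int :=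
  factors.foldl (fun out f => out * f) 1

-- 'while (q*i) % p != 1: i += 1' with fuel p.toNat (inside Pre_ the loop exits after < p steps; fuel is a totality guard only)
def pvIdemLoop (q p : Int) : Nat → Int → Int
  | 0, i => i
  | fuel+1, i => if PySem.Int.mod (q * i) p ≠ 1 then pvIdemLoop q p fuel (i + 1) else i

def pvIdempotent (n p : Int) : Int :=
  let q := PySem.Int.floordiv n p
  q * pvIdemLoop q p p.toNat 1

-- recursively_append_indices; recursion on i (an Int decreasing to -1) carried by a fuel that Pre_'s call depth never exhausts
def pvRec (n : Int) (sizes scales : List Int) : Nat → Int → Int → List Int → List Int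
  | 0, _, _, out => out
  | fuel+1, i, v, out =>
    if i < 0 then out ++ [PySem.Int.mod v n]
    else (PySem.List.pyRange 0 (PySem.List.pyGetD sizes i 0) 1).foldl
          (fun acc j => pvRec n sizes scales fuel (i - 1) (v + PySem.List.pyGetD scales i 0 * j) acc) out

def input_indices (factors : List Int) : List Int :=
  let n := pvProduct factors
  let e := factors.map (fun f => pvIdempotent n f)
  match PySem.List.pyGet? factors (-1), PySem.List.pyGet? e (-1) with
  | some fl, some el =>
    (PySem.List.pyRange 0 fl 1).foldl
      (fun out j => pvRec n factors e factors.length ((factors.length : Int) - 2) (el * j) out) []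
  | _, _ => []   -- factors[-1] raises IndexError on the empty list (excluded by Pre_)

-- ===== PORT B =====
def input_indices_alt (factors : List Int) : List Int :=
  let n := pvProduct factors
  let e := factors.map (fun f => pvIdempotent n f)
  (PySem.List.pyRange 0 n 1).map (fun t =>
    let st := (factors.zip e).foldl
      (fun (st : Int × Int) fe =>
        (st.1 + fe.2 * PySem.Int.mod st.2 fe.1, PySem.Int.floordiv st.2 fe.1)) (0, t)
    PySem.Int.mod st.1 n)

-- ===== PRECONDITION & SPEC =====
-- Pre_ = exactly where the Python A returns: factors nonempty (else IndexError), every factor ≥ 2 and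
-- coprime to the product of the others (else an assert fires or the inverse-finding while loop never exits).
def Pre_input_indices (factors : List Int) : Prop :=
  factors ≠ [] ∧ ∀ f ∈ factors, 2 ≤ f ∧ Int.gcd (PySem.Int.floordiv factors.prod f) f = 1
instance (factors : List Int) : Decidable (Pre_input_indices factors) := by
  unfold Pre_input_indices; infer_instance

def pvWitness_input_indices : List Int := [2, 3]

def Spec_input_indices (factors : List Int) (out : List Int) : Prop := out = input_indices_alt factors
instance (factors : List Int) (out : List Int) : Decidable (Spec_input_indices factors out) := by
  unfold Spec_input_indices; infer_instance

-- ===== CLAIM (what is proved, stated in full; the proofs are below) =====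
def Claim_equal_input_indices : Prop := ∀ (factors : List Int), Dom_input_indices factors → Pre_input_indices factors → Spec_input_indices factors (input_indices factors)

-- ===== LEMMAS AND PROOFS =====

-- mixed-radix value of t with digits taken fastest-first along the factor list (what B's inner divmod loop computes)
def decV : List Int → List Int → Int → Int
  | f :: fs, ef :: es, t => ef * PySem.Int.mod t f + decV fs es (PySem.Int.floordiv t f)
  | _, _, _ => 0

lemma foldl_decV (fs : List Int) : ∀ (es : List Int) (v0 t : Int),
    ((fs.zip es).foldl
      (fun (st : Int × Int) fe =>
        (st.1 + fe.2 * PySem.Int.mod st.2 fe.1, PySem.Int.floordiv st.2 fe.1)) (v0, t)).1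
      = v0 + decV fs es t := by
  induction fs with
  | nil => intro es v0 t; simp [decV]
  | cons f fs ih =>
    intro es v0 t
    cases es with
    | nil => simp [decV]
    | cons ef es =>
      simp only [List.zip_cons_cons, List.foldl_cons, decV, ih]
      ring_nf

lemma decV_append (f ef j : Int) (hj0 : 0 ≤ j) (hjf : j < f) :
    ∀ (fs es : List Int), fs.length = es.length → (∀ g ∈ fs, 0 < g) →
    ∀ r : Int, 0 ≤ r → r < fs.prod →
    decV (fs ++ [f]) (es ++ [ef]) (j * fs.prod + r) = decV fs es r + ef * j := by
  intro fs
  induction fs with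
  | nil =>
    intro es hlen _ r hr0 hr
    have hes : es = [] := by simpa using (List.length_eq_zero_iff.mp hlen.symm)
    subst hes
    have hr' : r = 0 := by simp at hr; omega
    subst hr'
    have hf : 0 < f := lt_of_le_of_lt hj0 hjf
    simp [decV, PySem.Int.mod_eq_emod_of_pos hf, Int.emod_eq_of_lt hj0 hjf]
  | cons f0 fs ih =>
    intro es hlen hpos r hr0 hr
    cases es with
    | nil => simp at hlen
    | cons e0 es =>
      have hf0 : 0 < f0 := hpos f0 (by simp)
      have hlen' : fs.length = es.length := by simpa using hlen
      have hpos' : ∀ g ∈ fs, 0 < g := fun g hg => hpos g (by simp [hg])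
      have hprodpos : 0 < fs.prod := List.prod_pos hpos'
      have ht : j * (f0 :: fs).prod + r = (j * fs.prod) * f0 + r := by
        simp [List.prod_cons]; ring
      have hmod : PySem.Int.mod ((j * fs.prod) * f0 + r) f0 = PySem.Int.mod r f0 := by
        rw [PySem.Int.mod_eq_emod_of_pos hf0, PySem.Int.mod_eq_emod_of_pos hf0]
        have h4 : (j * fs.prod) * f0 + r = r + f0 * (j * fs.prod) := by ring
        rw [h4, Int.add_mul_emod_self_left]
      have hdiv : PySem.Int.floordiv ((j * fs.prod) * f0 + r) f0
          = j * fs.prod + PySem.Int.floordiv r f0 := by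
        rw [PySem.Int.floordiv_eq_ediv_of_pos hf0, PySem.Int.floordiv_eq_ediv_of_pos hf0]
        rw [add_comm, Int.add_mul_ediv_right _ _ (by omega : f0 ≠ 0)]
        ring
      have hr0' : 0 ≤ PySem.Int.floordiv r f0 := by
        rw [PySem.Int.floordiv_eq_ediv_of_pos hf0]; exact Int.ediv_nonneg hr0 (le_of_lt hf0)
      have hr' : PySem.Int.floordiv r f0 < fs.prod := by
        rw [PySem.Int.floordiv_eq_ediv_of_pos hf0]
        have : r < fs.prod * f0 := by
          have := hr; simp [List.prod_cons] at this; nlinarith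
        exact Int.ediv_lt_of_lt_mul hf0 this
      calc decV ((f0 :: fs) ++ [f]) ((e0 :: es) ++ [ef]) (j * (f0 :: fs).prod + r)
          = e0 * PySem.Int.mod r f0
            + decV (fs ++ [f]) (es ++ [ef]) (j * fs.prod + PySem.Int.floordiv r f0) := by
            rw [ht]; simp only [List.cons_append, decV, hmod, hdiv]
        _ = e0 * PySem.Int.mod r f0 + (decV fs es (PySem.Int.floordiv r f0) + ef * j) := by
            rw [ih es hlen' hpos' _ hr0' hr']
        _ = decV (f0 :: fs) (e0 :: es) r + ef * j := by simp only [decV]; ring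

-- split range(P*m) into m consecutive blocks of length P
lemma map_pyRange_blocks (g : Int → Int) (P : Int) (hP : 0 ≤ P) : ∀ m : Nat,
    (PySem.List.pyRange 0 (P * (m : Int)) 1).map g
      = (PySem.List.pyRange 0 (m : Int) 1).flatMap
          (fun j => (PySem.List.pyRange 0 P 1).map (fun r => g (j * P + r))) := by
  intro m
  induction m with
  | zero => simp [PySem.List.pyRange_one_eq_nil]
  | succ m ih =>
    have h1 : (0:Int) ≤ P * m := by positivity
    have h2 : P * (m:Int) ≤ P * ((m:Int) + 1) := by nlinarith
    rw [show ((m+1 : Nat) : Int) = (m:Int) + 1 by push_cast; ring,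
        PySem.List.pyRange_one_append 0 (P * m) (P * ((m:Int)+1)) h1 h2,
        PySem.List.pyRange_one_succ_right (by positivity : (0:Int) ≤ (m:Int))]
    rw [List.map_append, List.flatMap_append, ih]
    congr 1
    simp only [List.flatMap_cons, List.flatMap_nil, List.append_nil]
    rw [PySem.List.pyRange_one (P * m) (P * ((m:Int)+1)), PySem.List.pyRange_one 0 P]
    simp only [List.map_map]
    have h3 : P * ((m:Int) + 1) - P * (m:Int) = P := by ring
    rw [h3, sub_zero]
    apply List.map_congr_left
    intro k _
    simp only [Function.comp]
    congr 1
    ring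

lemma map_pyRange_blocks' (g : Int → Int) (P c : Int) (hP : 0 ≤ P) (hc : 0 ≤ c) :
    (PySem.List.pyRange 0 (P * c) 1).map g
      = (PySem.List.pyRange 0 c 1).flatMap
          (fun j => (PySem.List.pyRange 0 P 1).map (fun r => g (j * P + r))) := by
  have hcc : c = ((c.toNat : Nat) : Int) := by omega
  rw [hcc]
  exact map_pyRange_blocks g P hP c.toNat

-- the core invariant of A's recursion: pvRec at i = m-1 appends the whole block for the first m factors
lemma pvRec_spec (n : Int) (fs es : List Int) (hlen : fs.length = es.length)
    (hpos : ∀ g ∈ fs, 0 < g) :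
    ∀ (m fuel : Nat), m ≤ fs.length → m < fuel → ∀ (v : Int) (out : List Int),
    pvRec n fs es fuel ((m : Int) - 1) v out
      = out ++ (PySem.List.pyRange 0 (fs.take m).prod 1).map
          (fun t => PySem.Int.mod (v + decV (fs.take m) (es.take m) t) n) := by
  intro m
  induction m with
  | zero =>
    intro fuel _ hfuel v out
    cases fuel with
    | zero => omega
    | succ fuel =>
      have : PySem.List.pyRange 0 1 1 = [0] := by decide
      simp [pvRec, decV, this]
  | succ m ih =>
    intro fuel hm hfuel v out
    cases fuel with
    | zero => omega
    | succ fuel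
    have hmlt : m < fs.length := by omega
    have hmlt' : m < es.length := by omega
    have hcast : ((m+1 : Nat) : Int) - 1 = ((m : Nat) : Int) := by push_cast; ring
    have hnotneg : ¬ ((m : Int) < 0) := by omega
    rw [hcast]
    simp only [pvRec, if_neg hnotneg]
    have hgetfs : PySem.List.pyGetD fs (m : Int) 0 = fs[m] := by
      rw [PySem.List.pyGetD_natCast, List.getD_eq_getElem fs 0 hmlt]
    have hgetes : PySem.List.pyGetD es (m : Int) 0 = es[m] := by
      rw [PySem.List.pyGetD_natCast, List.getD_eq_getElem es 0 hmlt']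
    rw [hgetfs, hgetes]
    have ih' : ∀ (acc : List Int) (j : Int),
        pvRec n fs es fuel ((m : Int) - 1) (v + es[m] * j) acc
          = acc ++ (PySem.List.pyRange 0 (fs.take m).prod 1).map
              (fun t => PySem.Int.mod (v + es[m] * j + decV (fs.take m) (es.take m) t) n) :=
      fun acc j => ih fuel (by omega) (by omega) (v + es[m] * j) acc
    simp only [ih']
    rw [PySem.List.foldl_append_eq_flatMap]
    congr 1
    -- RHS of the goal: the (m+1)-block as one range
    have htakefs : fs.take (m+1) = fs.take m ++ [fs[m]] := by
      rw [List.take_add_one]; simp [List.getElem?_eq_getElem hmlt]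
    have htakees : es.take (m+1) = es.take m ++ [es[m]] := by
      rw [List.take_add_one]; simp [List.getElem?_eq_getElem hmlt']
    have hposP : 0 < (fs.take m).prod :=
      List.prod_pos (fun g hg => hpos g (List.mem_of_mem_take hg))
    have hprod : (fs.take (m+1)).prod = (fs.take m).prod * fs[m] := by
      rw [htakefs, List.prod_append, List.prod_cons, List.prod_nil, mul_one]
    rw [hprod,
        map_pyRange_blocks' _ _ _ (le_of_lt hposP)
          (le_of_lt (hpos fs[m] (List.getElem_mem hmlt)))]
    rw [List.flatMap_def, List.flatMap_def]
    congr 1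
    apply List.map_congr_left
    intro j hj
    have hjb := (PySem.List.mem_pyRange_one).mp hj
    apply List.map_congr_left
    intro r hr
    have hrb := (PySem.List.mem_pyRange_one).mp hr
    have hd : decV (fs.take (m+1)) (es.take (m+1)) (j * (fs.take m).prod + r)
        = decV (fs.take m) (es.take m) r + es[m] * j := by
      rw [htakefs, htakees]
      exact decV_append fs[m] es[m] j hjb.1 (by simpa using hjb.2)
        (fs.take m) (es.take m) (by simp [hlen]) (fun g hg => hpos g (List.mem_of_mem_take hg))
        r hrb.1 hrb.2
    rw [hd]
    ring_nf

lemma pyGet_neg_one (xs : List Int) (h : xs ≠ []) :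
    PySem.List.pyGet? xs (-1) = some (xs.getLast h) := by
  have hlen : 0 < xs.length := List.length_pos_iff.mpr h
  have hc : -((xs.length : Int)) ≤ -1 := by omega
  simp only [PySem.List.pyGet?, PySem.List.pyIdx?]
  norm_num [hc]
  rw [List.getElem?_eq_getElem (by omega)]
  simp [List.getLast_eq_getElem]

lemma getLast_eq_getD (xs : List Int) (h : xs ≠ []) :
    xs.getLast h = xs.getD (xs.length - 1) 0 := by
  rw [List.getLast_eq_getElem, List.getD_eq_getElem xs 0 (by
    have := List.length_pos_iff.mpr h; omega)]

-- ===== VERDICT (by name: the statement is the Claim_ definition above) =====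
theorem input_indices_spec : Claim_equal_input_indices := by
  intro factors _ hPre
  unfold Spec_input_indices
  obtain ⟨hne, hall⟩ := hPre
  have hpos : ∀ g ∈ factors, 0 < g := fun g hg => by have := (hall g hg).1; omega
  have hlen0 : 0 < factors.length := List.length_pos_iff.mpr hne
  set n := pvProduct factors with hn
  set e := factors.map (fun f => pvIdempotent n f) with he
  have hlen : factors.length = e.length := by simp [he]
  have hene : e ≠ [] := by
    simp only [he, ne_eq, List.map_eq_nil_iff]; exact hne
  -- A side
  simp only [input_indices]
  simp only [← hn, ← he]
  rw [pyGet_neg_one factors hne, pyGet_neg_one e hene]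
  -- the outer loop is exactly the first unfolding of pvRec at i = length - 1
  have houter :
      (PySem.List.pyRange 0 (factors.getLast hne) 1).foldl
        (fun out j => pvRec n factors e factors.length ((factors.length : Int) - 2)
          (e.getLast hene * j) out) []
        = pvRec n factors e (factors.length + 1) (((factors.length : Int)) - 1) 0 [] := by
    have hk : ¬ ((factors.length : Int) - 1 < 0) := by omega
    simp only [pvRec, if_neg hk]
    have hgfs : PySem.List.pyGetD factors ((factors.length : Int) - 1) 0
        = factors.getLast hne := by
      have : ((factors.length : Int) - 1) = ((factors.length - 1 : Nat) : Int) := by omega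
      rw [this, PySem.List.pyGetD_natCast, getLast_eq_getD factors hne]
    have hges : PySem.List.pyGetD e ((factors.length : Int) - 1) 0 = e.getLast hene := by
      have : ((factors.length : Int) - 1) = ((e.length - 1 : Nat) : Int) := by
        rw [← hlen]; omega
      rw [this, PySem.List.pyGetD_natCast, getLast_eq_getD e hene]
    rw [hgfs, hges]
    simp only [zero_add]
    have hi : (factors.length : Int) - 1 - 1 = (factors.length : Int) - 2 := by ring
    rw [hi]
  dsimp only
  rw [houter]
  rw [pvRec_spec n factors e (by omega) hpos factors.length (factors.length + 1)
    (le_refl _) (by omega) 0 []]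
  simp only [List.take_length, List.nil_append]
  have htakee : e.take factors.length = e := by rw [hlen, List.take_length]
  rw [htakee]
  -- B side
  simp only [input_indices_alt]
  simp only [← hn, ← he]
  have hnprod : n = factors.prod := by
    rw [hn, List.prod_eq_foldl]; rfl
  rw [← hnprod]
  apply List.map_congr_left
  intro t _
  rw [foldl_decV factors e 0 t]
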